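-- pv_equiv track=rewrite | github.com/amalrajan/advent-of-code | 2024/02.2.py | is_safe_by_removing_one
-- ===== SOURCE A (Python) =====
-- def is_safe_by_removing_one(nums):
--     # Time complexity: O(N)
--     # If I were to simulate removing elements one by one, it would cost O(N^2)
--     def left_to_right():
--         prev = nums[0] - 1
--         flag = False
--         for num in nums:
--             diff = num - prev
--             if not 1 <= diff <= 3:
--                 if flag:
--                     return False
--                 flag = True
--             else:
--                 prev = num
--
--         return True
--
--     def right_to_left():
--         prev = nums[-1] + 1
--         flag = False
--         for num in nums[::-1]:
--             diff = num - prev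
--             if not -3 <= diff <= -1:
--                 if flag:
--                     return False
--                 flag = True
--             else:
--                 prev = num
--
--         return True
--
--     return left_to_right() or right_to_left()
-- ===== SOURCE B (Python) =====
-- def is_safe_by_removing_one(nums):
--     # Brute-force "problem dampener": the list is safe if it, or the list
--     # obtained by deleting one element, is strictly increasing with every
--     # consecutive step between 1 and 3.  (A only accepts increasing runs,
--     # so no decreasing check is needed.)
--     def inc(xs):
--         return all(1 <= b - a <= 3 for a, b in zip(xs, xs[1:]))
--
--     if inc(nums):
--         return True
--     return any(inc(nums[:i] + nums[i + 1:]) for i in range(len(nums)))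
-- ===== Notes on version B (the rewrite author's own statement) =====
-- stated objective: simpler
-- what changed: A's two greedy single-skip scans (left-to-right and right-to-left with a one-shot flag) are replaced by the direct brute-force dampener: test the list itself and every one-element deletion against the plain increasing-with-steps-between-1-and-3 predicate.
import Mathlib
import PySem

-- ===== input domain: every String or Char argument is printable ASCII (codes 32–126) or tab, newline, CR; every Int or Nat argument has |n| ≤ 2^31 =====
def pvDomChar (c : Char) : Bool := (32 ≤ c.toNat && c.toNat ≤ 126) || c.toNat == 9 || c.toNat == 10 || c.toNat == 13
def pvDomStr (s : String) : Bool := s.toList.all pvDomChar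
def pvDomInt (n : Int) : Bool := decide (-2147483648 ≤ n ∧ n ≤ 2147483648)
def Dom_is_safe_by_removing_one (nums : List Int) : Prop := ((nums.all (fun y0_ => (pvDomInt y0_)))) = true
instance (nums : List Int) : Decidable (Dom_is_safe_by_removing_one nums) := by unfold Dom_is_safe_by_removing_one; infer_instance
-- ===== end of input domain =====

-- B replaces A's two greedy one-skip scans by the direct brute-force dampener
-- (test the list and every one-element deletion); simpler, not faster.
-- A raises IndexError on [] (nums[0]); that input is excluded by Pre_ and B returns True there.

-- ===== PORT A =====
-- the `left_to_right` loop: state (prev, flag), early `return False` = false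
def goL (prev : Int) (flag : Bool) : List Int → Bool
  | [] => true
  | x :: l =>
    if 1 ≤ x - prev ∧ x - prev ≤ 3 then goL x flag l
    else if flag then false
    else goL prev true l

-- the `right_to_left` loop
def goR (prev : Int) (flag : Bool) : List Int → Bool
  | [] => true
  | x :: l =>
    if -3 ≤ x - prev ∧ x - prev ≤ -1 then goR x flag l
    else if flag then false
    else goR prev true l

def is_safe_by_removing_one (nums : List Int) : Bool :=
  match nums with
  | [] => false   -- nums[0] raises IndexError here; excluded by Pre_
  | h :: t =>
    -- left_to_right() or right_to_left(); nums[::-1] = reverse, nums[-1] = head of reverse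
    goL (h - 1) false (h :: t) ||
      (let r := (h :: t).reverse
       goR (r.headD 0 + 1) false r)

-- ===== PORT B =====
-- inc(xs) = all(1 <= b - a <= 3 for a, b in zip(xs, xs[1:]))
def pyInc (xs : List Int) : Bool :=
  (xs.zip xs.tail).all (fun ab => decide (1 ≤ ab.2 - ab.1) && decide (ab.2 - ab.1 ≤ 3))

def is_safe_by_removing_one_alt (nums : List Int) : Bool :=
  if pyInc nums then true
  else (List.range nums.length).any (fun i => pyInc (nums.take i ++ nums.drop (i + 1)))

-- ===== PRECONDITION & SPEC =====
-- Pre_ excludes only the empty list, on which A raises IndexError (nums[0]).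
def Pre_is_safe_by_removing_one (nums : List Int) : Prop := nums ≠ []
instance (nums : List Int) : Decidable (Pre_is_safe_by_removing_one nums) := by
  unfold Pre_is_safe_by_removing_one; infer_instance

def pvWitness_is_safe_by_removing_one : List Int := [1, 2, 3]

def Spec_is_safe_by_removing_one (nums : List Int) (out : Bool) : Prop :=
  out = is_safe_by_removing_one_alt nums
instance (nums : List Int) (out : Bool) : Decidable (Spec_is_safe_by_removing_one nums out) := by
  unfold Spec_is_safe_by_removing_one; infer_instance

-- ===== CLAIM (what is proved, stated in full; the proofs are below) =====
def Claim_equal_is_safe_by_removing_one : Prop :=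
  ∀ (nums : List Int), Dom_is_safe_by_removing_one nums →
    Pre_is_safe_by_removing_one nums →
    Spec_is_safe_by_removing_one nums (is_safe_by_removing_one nums)

-- ===== LEMMAS AND PROOFS =====

-- "pair j is an admissible step" for adjacent elements j, j+1
def PairOK (l : List Int) (j : Nat) : Prop :=
  1 ≤ l.getD (j + 1) 0 - l.getD j 0 ∧ l.getD (j + 1) 0 - l.getD j 0 ≤ 3

def DPairOK (l : List Int) (j : Nat) : Prop :=
  -3 ≤ l.getD (j + 1) 0 - l.getD j 0 ∧ l.getD (j + 1) 0 - l.getD j 0 ≤ -1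

-- decreasing analogue of pyInc (proof-side only)
def dInc : List Int → Bool
  | [] => true
  | [_] => true
  | a :: b :: t => (decide (-3 ≤ b - a) && decide (b - a ≤ -1)) && dInc (b :: t)

-- index of the first bad adjacent pair (increasing reading)
def firstB : List Int → Option Nat
  | [] => none
  | [_] => none
  | a :: b :: t =>
    if 1 ≤ b - a ∧ b - a ≤ 3 then (firstB (b :: t)).map (· + 1) else some 0

-- index of the first bad adjacent pair (decreasing reading)
def firstD : List Int → Option Nat
  | [] => none
  | [_] => none
  | a :: b :: t =>
    if -3 ≤ b - a ∧ b - a ≤ -1 then (firstD (b :: t)).map (· + 1) else some 0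

theorem pyInc_nil : pyInc [] = true := rfl
theorem pyInc_single (a : Int) : pyInc [a] = true := rfl
theorem pyInc_cons₂ (a b : Int) (t : List Int) :
    pyInc (a :: b :: t) = ((decide (1 ≤ b - a) && decide (b - a ≤ 3)) && pyInc (b :: t)) := rfl

theorem PairOK_cons (a : Int) (l : List Int) (j : Nat) :
    PairOK (a :: l) (j + 1) ↔ PairOK l j := by
  simp [PairOK]

theorem DPairOK_cons (a : Int) (l : List Int) (j : Nat) :
    DPairOK (a :: l) (j + 1) ↔ DPairOK l j := by
  simp [DPairOK]

theorem pyInc_iff (l : List Int) :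
    pyInc l = true ↔ ∀ j, j + 1 < l.length → PairOK l j := by
  induction l with
  | nil => simp [pyInc_nil]
  | cons a l ih =>
    cases l with
    | nil => simp [pyInc_single]
    | cons b t =>
      rw [pyInc_cons₂, Bool.and_eq_true, Bool.and_eq_true, decide_eq_true_iff,
        decide_eq_true_iff, ih]
      constructor
      · rintro ⟨⟨h1, h2⟩, hrest⟩ j hj
        cases j with
        | zero => exact ⟨by simpa [PairOK] using h1, by simpa [PairOK] using h2⟩
        | succ j =>
          rw [PairOK_cons]
          exact hrest j (by simpa using hj)
      · intro H
        refine ⟨⟨?_, ?_⟩, ?_⟩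
        · have := H 0 (by simp)
          simpa [PairOK] using this.1
        · have := H 0 (by simp)
          simpa [PairOK] using this.2
        · intro j hj
          rw [← PairOK_cons a]
          exact H (j + 1) (by simpa using hj)

theorem dInc_iff (l : List Int) :
    dInc l = true ↔ ∀ j, j + 1 < l.length → DPairOK l j := by
  induction l with
  | nil => simp [dInc]
  | cons a l ih =>
    cases l with
    | nil => simp [dInc]
    | cons b t =>
      rw [show dInc (a :: b :: t) = ((decide (-3 ≤ b - a) && decide (b - a ≤ -1)) && dInc (b :: t)) from rfl,
        Bool.and_eq_true, Bool.and_eq_true, decide_eq_true_iff, decide_eq_true_iff, ih]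
      constructor
      · rintro ⟨⟨h1, h2⟩, hrest⟩ j hj
        cases j with
        | zero => exact ⟨by simpa [DPairOK] using h1, by simpa [DPairOK] using h2⟩
        | succ j =>
          rw [DPairOK_cons]
          exact hrest j (by simpa using hj)
      · intro H
        refine ⟨⟨?_, ?_⟩, ?_⟩
        · have := H 0 (by simp)
          simpa [DPairOK] using this.1
        · have := H 0 (by simp)
          simpa [DPairOK] using this.2
        · intro j hj
          rw [← DPairOK_cons a]
          exact H (j + 1) (by simpa using hj)

theorem firstB_none (l : List Int) : firstB l = none ↔ pyInc l = true := by
  induction l with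
  | nil => simp [firstB, pyInc_nil]
  | cons a l ih =>
    cases l with
    | nil => simp [firstB, pyInc_single]
    | cons b t =>
      rw [show firstB (a :: b :: t) =
          (if 1 ≤ b - a ∧ b - a ≤ 3 then (firstB (b :: t)).map (· + 1) else some 0) from rfl,
        pyInc_cons₂]
      by_cases h : 1 ≤ b - a ∧ b - a ≤ 3
      · simp [h, ih]
      · simp only [if_neg h]
        constructor
        · intro hc; exact absurd hc (by simp)
        · intro hc
          rw [Bool.and_eq_true, Bool.and_eq_true, decide_eq_true_iff, decide_eq_true_iff] at hc
          exact absurd ⟨hc.1.1, hc.1.2⟩ h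

theorem firstD_none (l : List Int) : firstD l = none ↔ dInc l = true := by
  induction l with
  | nil => simp [firstD, dInc]
  | cons a l ih =>
    cases l with
    | nil => simp [firstD, dInc]
    | cons b t =>
      rw [show firstD (a :: b :: t) =
          (if -3 ≤ b - a ∧ b - a ≤ -1 then (firstD (b :: t)).map (· + 1) else some 0) from rfl,
        show dInc (a :: b :: t) = ((decide (-3 ≤ b - a) && decide (b - a ≤ -1)) && dInc (b :: t)) from rfl]
      by_cases h : -3 ≤ b - a ∧ b - a ≤ -1
      · simp [h, ih]
      · simp only [if_neg h]
        constructor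
        · intro hc; exact absurd hc (by simp)
        · intro hc
          rw [Bool.and_eq_true, Bool.and_eq_true, decide_eq_true_iff, decide_eq_true_iff] at hc
          exact absurd ⟨hc.1.1, hc.1.2⟩ h

theorem firstB_some (l : List Int) (j : Nat) (h : firstB l = some j) :
    j + 1 < l.length ∧ ¬ PairOK l j ∧ ∀ m, m < j → PairOK l m := by
  induction l generalizing j with
  | nil => simp [firstB] at h
  | cons a l ih =>
    cases l with
    | nil => simp [firstB] at h
    | cons b t =>
      rw [show firstB (a :: b :: t) =
          (if 1 ≤ b - a ∧ b - a ≤ 3 then (firstB (b :: t)).map (· + 1) else some 0) from rfl] at h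
      by_cases hc : 1 ≤ b - a ∧ b - a ≤ 3
      · rw [if_pos hc] at h
        rcases Option.map_eq_some_iff.mp h with ⟨k, hk, rfl⟩
        obtain ⟨h1, h2, h3⟩ := ih k hk
        refine ⟨by simpa using h1, ?_, ?_⟩
        · rw [PairOK_cons]; exact h2
        · intro m hm
          cases m with
          | zero => simpa [PairOK] using hc
          | succ m => rw [PairOK_cons]; exact h3 m (by omega)
      · rw [if_neg hc] at h
        injection h with h
        subst h
        refine ⟨by simp, ?_, by omega⟩
        simpa [PairOK] using hc

theorem firstD_some (l : List Int) (j : Nat) (h : firstD l = some j) :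
    j + 1 < l.length ∧ ¬ DPairOK l j ∧ ∀ m, m < j → DPairOK l m := by
  induction l generalizing j with
  | nil => simp [firstD] at h
  | cons a l ih =>
    cases l with
    | nil => simp [firstD] at h
    | cons b t =>
      rw [show firstD (a :: b :: t) =
          (if -3 ≤ b - a ∧ b - a ≤ -1 then (firstD (b :: t)).map (· + 1) else some 0) from rfl] at h
      by_cases hc : -3 ≤ b - a ∧ b - a ≤ -1
      · rw [if_pos hc] at h
        rcases Option.map_eq_some_iff.mp h with ⟨k, hk, rfl⟩
        obtain ⟨h1, h2, h3⟩ := ih k hk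
        refine ⟨by simpa using h1, ?_, ?_⟩
        · rw [DPairOK_cons]; exact h2
        · intro m hm
          cases m with
          | zero => simpa [DPairOK] using hc
          | succ m => rw [DPairOK_cons]; exact h3 m (by omega)
      · rw [if_neg hc] at h
        injection h with h
        subst h
        refine ⟨by simp, ?_, by omega⟩
        simpa [DPairOK] using hc

-- the left pass with the skip spent checks the plain chain
theorem goL_true (p : Int) (l : List Int) : goL p true l = pyInc (p :: l) := by
  induction l generalizing p with
  | nil => rfl
  | cons x l ih =>
    rw [show goL p true (x :: l) =
        (if 1 ≤ x - p ∧ x - p ≤ 3 then goL x true l else false) from rfl]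
    by_cases h : 1 ≤ x - p ∧ x - p ≤ 3
    · rw [if_pos h, ih, pyInc_cons₂]
      simp [h.1, h.2]
    · rw [if_neg h, pyInc_cons₂]
      rcases Decidable.not_and_iff_not_or_not.mp h with h' | h' <;> simp [h']

theorem goR_true (p : Int) (l : List Int) : goR p true l = dInc (p :: l) := by
  induction l generalizing p with
  | nil => rfl
  | cons x l ih =>
    rw [show goR p true (x :: l) =
        (if -3 ≤ x - p ∧ x - p ≤ -1 then goR x true l else false) from rfl]
    by_cases h : -3 ≤ x - p ∧ x - p ≤ -1
    · rw [if_pos h, ih,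
        show dInc (p :: x :: l) = ((decide (-3 ≤ x - p) && decide (x - p ≤ -1)) && dInc (x :: l)) from rfl]
      simp [h.1, h.2]
    · rw [if_neg h,
        show dInc (p :: x :: l) = ((decide (-3 ≤ x - p) && decide (x - p ≤ -1)) && dInc (x :: l)) from rfl]
      rcases Decidable.not_and_iff_not_or_not.mp h with h' | h' <;> simp [h']

-- the fresh left pass: succeeds iff the chain is good, or erasing the right
-- element of the first bad pair makes it good
theorem goL_false (p : Int) (l : List Int) :
    goL p false l = (match firstB (p :: l) with
      | none => true
      | some k => pyInc ((p :: l).eraseIdx (k + 1))) := by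
  induction l generalizing p with
  | nil => rfl
  | cons x l ih =>
    rw [show goL p false (x :: l) =
        (if 1 ≤ x - p ∧ x - p ≤ 3 then goL x false l else goL p true l) from rfl,
      show firstB (p :: x :: l) =
        (if 1 ≤ x - p ∧ x - p ≤ 3 then (firstB (x :: l)).map (· + 1) else some 0) from rfl]
    by_cases h : 1 ≤ x - p ∧ x - p ≤ 3
    · rw [if_pos h, if_pos h, ih]
      cases hfb : firstB (x :: l) with
      | none => simp
      | some k =>
        simp only [Option.map_some]
        show pyInc ((x :: l).eraseIdx (k + 1)) = pyInc ((p :: x :: l).eraseIdx (k + 1 + 1))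
        rw [show (p :: x :: l).eraseIdx (k + 1 + 1) = p :: (x :: l).eraseIdx (k + 1) from rfl,
          show (x :: l).eraseIdx (k + 1) = x :: l.eraseIdx k from rfl, pyInc_cons₂]
        simp [h.1, h.2]
    · rw [if_neg h, if_neg h, goL_true]
      rfl

theorem goR_false (p : Int) (l : List Int) :
    goR p false l = (match firstD (p :: l) with
      | none => true
      | some k => dInc ((p :: l).eraseIdx (k + 1))) := by
  induction l generalizing p with
  | nil => rfl
  | cons x l ih =>
    rw [show goR p false (x :: l) =
        (if -3 ≤ x - p ∧ x - p ≤ -1 then goR x false l else goR p true l) from rfl,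
      show firstD (p :: x :: l) =
        (if -3 ≤ x - p ∧ x - p ≤ -1 then (firstD (x :: l)).map (· + 1) else some 0) from rfl]
    by_cases h : -3 ≤ x - p ∧ x - p ≤ -1
    · rw [if_pos h, if_pos h, ih]
      cases hfb : firstD (x :: l) with
      | none => simp
      | some k =>
        simp only [Option.map_some]
        show dInc ((x :: l).eraseIdx (k + 1)) = dInc ((p :: x :: l).eraseIdx (k + 1 + 1))
        rw [show (p :: x :: l).eraseIdx (k + 1 + 1) = p :: (x :: l).eraseIdx (k + 1) from rfl,
          show (x :: l).eraseIdx (k + 1) = x :: l.eraseIdx k from rfl,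
          show dInc (p :: x :: l.eraseIdx k) =
            ((decide (-3 ≤ x - p) && decide (x - p ≤ -1)) && dInc (x :: l.eraseIdx k)) from rfl]
        simp [h.1, h.2]
    · rw [if_neg h, if_neg h, goR_true]
      rfl

theorem getD_eraseIdx (l : List Int) (i k : Nat) :
    (l.eraseIdx i).getD k 0 = if k < i then l.getD k 0 else l.getD (k + 1) 0 := by
  induction l generalizing i k with
  | nil => simp [List.eraseIdx]
  | cons a l ih =>
    cases i with
    | zero => simp [List.eraseIdx]
    | succ i =>
      cases k with
      | zero => simp [List.eraseIdx]
      | succ k =>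
        rw [show (a :: l).eraseIdx (i + 1) = a :: l.eraseIdx i from rfl,
          List.getD_cons_succ, List.getD_cons_succ, ih]
        by_cases h : k < i
        · rw [if_pos h, if_pos (by omega)]
        · rw [if_neg h, if_neg (by omega), List.getD_cons_succ]

theorem getD_reverse (l : List Int) (k : Nat) (h : k < l.length) :
    l.reverse.getD k 0 = l.getD (l.length - 1 - k) 0 := by
  have h' : k < l.reverse.length := by simpa using h
  have h2 : l.length - 1 - k < l.length := by omega
  rw [List.getD_eq_getElem?_getD, List.getD_eq_getElem?_getD,
    List.getElem?_eq_getElem h', List.getElem?_eq_getElem h2]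
  simp [List.getElem_reverse]

theorem DPairOK_reverse (l : List Int) (k : Nat) (h : k + 1 < l.length) :
    DPairOK l.reverse k ↔ PairOK l (l.length - 2 - k) := by
  unfold DPairOK PairOK
  rw [getD_reverse _ _ (by omega), getD_reverse _ _ (by omega)]
  have e1 : l.length - 1 - (k + 1) = l.length - 2 - k := by omega
  have e2 : l.length - 1 - k = (l.length - 2 - k) + 1 := by omega
  rw [e1, e2]
  constructor <;> intro ⟨h1, h2⟩ <;> omega

theorem dInc_reverse (l : List Int) : dInc l.reverse = true ↔ pyInc l = true := by
  rw [dInc_iff, pyInc_iff]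
  constructor
  · intro H j hj
    have hk : (l.length - 2 - j) + 1 < l.reverse.length := by simp; omega
    have := (DPairOK_reverse l (l.length - 2 - j) (by omega)).mp (H _ hk)
    have e : l.length - 2 - (l.length - 2 - j) = j := by omega
    rwa [e] at this
  · intro H k hk
    rw [List.length_reverse] at hk
    rw [DPairOK_reverse l k hk]
    exact H _ (by omega)

theorem eraseIdx_reverse (l : List Int) (i : Nat) (h : i < l.length) :
    l.reverse.eraseIdx (l.length - 1 - i) = (l.eraseIdx i).reverse := by
  rw [List.eraseIdx_eq_take_drop_succ, List.eraseIdx_eq_take_drop_succ, List.reverse_append,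
    List.reverse_take, List.reverse_drop]
  have e1 : l.length - (i + 1) = l.length - 1 - i := by omega
  have e2 : l.length - i = l.length - 1 - i + 1 := by omega
  rw [e1, e2]

theorem dInc_erase_reverse (l : List Int) (m : Nat) (hm : m < l.length) :
    dInc (l.reverse.eraseIdx m) = true ↔ pyInc (l.eraseIdx (l.length - 1 - m)) = true := by
  have hi : l.length - 1 - m < l.length := by omega
  have e : l.length - 1 - (l.length - 1 - m) = m := by omega
  rw [show l.reverse.eraseIdx m = (l.eraseIdx (l.length - 1 - m)).reverse from by
      rw [← eraseIdx_reverse l _ hi, e],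
    dInc_reverse]

-- characterisation of B: the list itself, or some one-element deletion, is good
theorem alt_iff (nums : List Int) :
    is_safe_by_removing_one_alt nums = true ↔
      pyInc nums = true ∨ ∃ i, i < nums.length ∧ pyInc (nums.eraseIdx i) = true := by
  unfold is_safe_by_removing_one_alt
  by_cases h : pyInc nums = true
  · simp [h]
  · simp only [h, if_false, List.any_eq_true, List.mem_range, Bool.false_eq_true, false_or]
    constructor
    · rintro ⟨i, hi, he⟩
      exact ⟨i, hi, by rwa [List.eraseIdx_eq_take_drop_succ]⟩
    · rintro ⟨i, hi, he⟩
      exact ⟨i, hi, by rwa [List.eraseIdx_eq_take_drop_succ] at he⟩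

-- if deleting index i repairs the list, every bad pair touches i
theorem erase_pair (l : List Int) (i j : Nat) (hi : i < l.length)
    (hinc : pyInc (l.eraseIdx i) = true) (hj : j + 1 < l.length) (hbad : ¬ PairOK l j) :
    j = i ∨ j + 1 = i := by
  by_contra hc
  simp only [not_or] at hc
  rw [pyInc_iff] at hinc
  have hlen : (l.eraseIdx i).length = l.length - 1 := by
    rw [List.length_eraseIdx, if_pos hi]
  rcases Nat.lt_or_ge (j + 1) i with h1 | h2
  · have hp := hinc j (by omega)
    unfold PairOK at hp
    rw [getD_eraseIdx, getD_eraseIdx, if_pos (by omega), if_pos (by omega)] at hp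
    exact hbad hp
  · have hij : i < j := by omega
    have hp := hinc (j - 1) (by omega)
    unfold PairOK at hp
    rw [getD_eraseIdx, getD_eraseIdx, if_neg (by omega), if_neg (by omega)] at hp
    have ej : j - 1 + 1 = j := by omega
    rw [ej] at hp
    exact hbad hp

-- full characterisation of A on a nonempty list
theorem A_char (h : Int) (t : List Int) :
    is_safe_by_removing_one (h :: t) = true ↔
      ((firstB (h :: t) = none ∨
        ∃ k, firstB (h :: t) = some k ∧ pyInc ((h :: t).eraseIdx (k + 1)) = true) ∨
       (firstD ((h :: t).reverse) = none ∨
        ∃ k, firstD ((h :: t).reverse) = some k ∧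
          dInc (((h :: t).reverse).eraseIdx (k + 1)) = true)) := by
  have hL : goL (h - 1) false (h :: t) = goL h false t := by
    rw [show goL (h - 1) false (h :: t) =
        (if 1 ≤ h - (h - 1) ∧ h - (h - 1) ≤ 3 then goL h false t else goL (h - 1) true t) from rfl,
      if_pos (by omega)]
  rw [show is_safe_by_removing_one (h :: t) =
      (goL (h - 1) false (h :: t) ||
        goR ((h :: t).reverse.headD 0 + 1) false ((h :: t).reverse)) from rfl,
    Bool.or_eq_true, hL, goL_false]
  cases hr : (h :: t).reverse with
  | nil => exact absurd hr (by simp)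
  | cons rh rt =>
    have hR : goR (rh + 1) false (rh :: rt) = goR rh false rt := by
      rw [show goR (rh + 1) false (rh :: rt) =
          (if -3 ≤ rh - (rh + 1) ∧ rh - (rh + 1) ≤ -1 then goR rh false rt
           else goR (rh + 1) true rt) from rfl,
        if_pos (by omega)]
    rw [List.headD_cons, hR, goR_false]
    constructor
    · rintro (hl | hr')
      · left
        cases hfb : firstB (h :: t) with
        | none => exact Or.inl rfl
        | some k => rw [hfb] at hl; exact Or.inr ⟨k, rfl, hl⟩
      · right
        cases hfd : firstD (rh :: rt) with
        | none => exact Or.inl rfl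
        | some k => rw [hfd] at hr'; exact Or.inr ⟨k, rfl, hr'⟩
    · rintro ((hn | ⟨k, hk, he⟩) | (hn | ⟨k, hk, he⟩))
      · left; rw [hn]
      · left; rw [hk]; exact he
      · right; rw [hn]
      · right; rw [hk]; exact he

-- the heart of the proof: A = true ↔ B = true on a nonempty list
theorem main_iff (h : Int) (t : List Int) :
    is_safe_by_removing_one (h :: t) = true ↔ is_safe_by_removing_one_alt (h :: t) = true := by
  rw [A_char, alt_iff]
  constructor
  · rintro ((hn | ⟨k, hk, he⟩) | (hn | ⟨k, hk, he⟩))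
    · exact Or.inl ((firstB_none _).mp hn)
    · obtain ⟨h1, _, _⟩ := firstB_some _ _ hk
      exact Or.inr ⟨k + 1, h1, he⟩
    · exact Or.inl ((pyInc_iff _).mpr (by
        have := (firstD_none _).mp hn
        rw [dInc_reverse] at this
        exact (pyInc_iff _).mp this))
    · obtain ⟨h1, _, _⟩ := firstD_some _ _ hk
      rw [List.length_reverse] at h1
      have := (dInc_erase_reverse (h :: t) (k + 1) h1).mp he
      exact Or.inr ⟨(h :: t).length - 1 - (k + 1), by omega, this⟩
  · rintro (hInc | ⟨i, hi, hie⟩)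
    · exact Or.inl (Or.inl ((firstB_none _).mpr hInc))
    · by_cases hInc : pyInc (h :: t) = true
      · exact Or.inl (Or.inl ((firstB_none _).mpr hInc))
      · obtain ⟨fj, hfj⟩ : ∃ fj, firstB (h :: t) = some fj := by
          cases hfb : firstB (h :: t) with
          | none => exact absurd ((firstB_none _).mp hfb) hInc
          | some k => exact ⟨k, rfl⟩
        obtain ⟨hfj1, hfj2, hfj3⟩ := firstB_some _ _ hfj
        rcases erase_pair (h :: t) i fj hi hie hfj1 hfj2 with hfi | hfi
        · -- fj = i: the right-to-left pass succeeds
          obtain ⟨jd, hjd⟩ : ∃ jd, firstD ((h :: t).reverse) = some jd := by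
            cases hfd : firstD ((h :: t).reverse) with
            | none =>
              exact absurd ((dInc_reverse _).mp ((firstD_none _).mp hfd)) hInc
            | some k => exact ⟨k, rfl⟩
          obtain ⟨hjd1, hjd2, hjd3⟩ := firstD_some _ _ hjd
          rw [List.length_reverse] at hjd1
          set n := (h :: t).length with hn
          have hlj_bad : ¬ PairOK (h :: t) (n - 2 - jd) := by
            intro hp
            exact hjd2 ((DPairOK_reverse (h :: t) jd (by omega)).mpr hp)
          have hljn : n - 2 - jd + 1 < n := by omega
          have hfle : fj ≤ n - 2 - jd := by
            by_contra hlt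
            exact hlj_bad (hfj3 _ (Nat.lt_of_not_le hlt))
          rcases erase_pair (h :: t) i (n - 2 - jd) hi hie hljn hlj_bad with hl | hl
          · -- lj = i
            right; right
            refine ⟨jd, hjd, ?_⟩
            rw [dInc_erase_reverse (h :: t) (jd + 1) hjd1]
            have e : n - 1 - (jd + 1) = n - 2 - jd := by omega
            rw [e, hl]
            exact hie
          · -- lj + 1 = i: impossible, since fj = i ≤ lj
            omega
        · -- fj + 1 = i: the left-to-right pass succeeds
          left; right
          exact ⟨fj, hfj, by rw [hfi]; exact hie⟩

-- ===== VERDICT (by name: the statement is the Claim_ definition above) =====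
theorem is_safe_by_removing_one_spec : Claim_equal_is_safe_by_removing_one := by
  intro nums _ hpre
  unfold Spec_is_safe_by_removing_one
  cases nums with
  | nil => exact absurd rfl hpre
  | cons h t => exact Bool.eq_iff_iff.mpr (main_iff h t)
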